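-- pv_equiv track=rewrite | github.com/minhducngo2006/pp2025 | 7.shell.py | parse_command
-- ===== SOURCE A (Python) =====
-- def parse_command(line):
--     tokens = line.strip().split()
--     if not tokens:
--         return [], {}, []
--
--     # Parse redirections
--     redirects = {'<': None, '>': None}
--     args = []
--     i = 0
--     while i < len(tokens):
--         if tokens[i] in ('<', '>'):
--             if i + 1 >= len(tokens):
--                 raise ValueError(f"Missing file after {tokens[i]}")
--             redirects[tokens[i]] = tokens[i + 1]
--             i += 2
--         else:
--             args.append(tokens[i])
--             i += 1
--
--     # Split by pipes
--     if '|' not in args: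
--         return [args], redirects, []
--
--     pipe_cmds = []
--     current_cmd = []
--     for token in args:
--         if token == '|':
--             if current_cmd:
--                 pipe_cmds.append(current_cmd)
--             current_cmd = []
--         else:
--             current_cmd.append(token)
--     if current_cmd:
--         pipe_cmds.append(current_cmd)
--
--     return pipe_cmds, redirects, []
-- ===== SOURCE B (Python) =====
-- def parse_command(line):
--     tokens = line.strip().split()
--     if not tokens:
--         return [], {}, []
--
--     # One fused scan: redirects, pipe groups and plain args in a single pass.
--     redirects = {'<': None, '>': None}
--     pipe_cmds = []
--     current = []
--     saw_pipe = False
--     i = 0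
--     n = len(tokens)
--     while i < n:
--         t = tokens[i]
--         if t in ('<', '>'):
--             if i + 1 >= n:
--                 raise ValueError(f"Missing file after {t}")
--             redirects[t] = tokens[i + 1]
--             i += 2
--         elif t == '|':
--             if current:
--                 pipe_cmds.append(current)
--             current = []
--             saw_pipe = True
--             i += 1
--         else:
--             current.append(t)
--             i += 1
--
--     if saw_pipe:
--         if current:
--             pipe_cmds.append(current)
--         return pipe_cmds, redirects, []
--     return [current], redirects, []
-- ===== Notes on version B (the rewrite author's own statement) =====
-- stated objective: simpler
-- what changed: Replaces A's two sequential passes (redirect extraction into an intermediate args list, then a membership test plus a second pipe-splitting loop) with one fused scan that never materialises args: it dispatches each token to redirects, to the current pipe group, or closes the group, using a saw_pipe flag to reproduce the [args]-even-if-empty result of pipe-free lines.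
-- outside the precondition, e.g. on parse_command('<'): A raises ValueError, B raises ValueError; on parse_command('>'): A raises ValueError, B raises ValueError; on parse_command('ls <'): A raises ValueError, B raises ValueError
import Mathlib
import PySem

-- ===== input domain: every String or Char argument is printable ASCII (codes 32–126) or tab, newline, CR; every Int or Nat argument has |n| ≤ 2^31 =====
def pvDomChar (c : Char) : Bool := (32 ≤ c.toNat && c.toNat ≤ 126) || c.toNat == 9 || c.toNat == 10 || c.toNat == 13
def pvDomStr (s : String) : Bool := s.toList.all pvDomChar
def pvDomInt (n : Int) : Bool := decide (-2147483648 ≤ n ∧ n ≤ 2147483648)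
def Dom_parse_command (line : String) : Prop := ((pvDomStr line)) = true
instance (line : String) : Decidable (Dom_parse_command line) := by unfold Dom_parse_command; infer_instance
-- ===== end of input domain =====

-- B fuses A's two passes (redirect scan building args, then pipe split of args) into one
-- token scan with a saw_pipe flag; objective: simpler (no intermediate args list).
-- Both Pythons raise ValueError when a '<'/'>' reached by the scan has no following token;
-- those inputs are outside Pre_ (both ports return a harmless value there).

-- ===== PORT A =====
-- while-loop over token indices: redirect tokens consume the next token into the dict,
-- other tokens are appended to args.  The `[] => (rd, args)` arm is Python's ValueError
-- (excluded by Pre_parse_command).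
def pvScanA : List String → PySem.Dict String (Option String) → List String →
    PySem.Dict String (Option String) × List String
  | [], rd, args => (rd, args)
  | t :: rest, rd, args =>
    if t == "<" || t == ">" then
      match rest with
      | [] => (rd, args)                -- Python: raise ValueError (outside Pre_)
      | f :: rest' => pvScanA rest' (rd.insert t (some f)) args
    else pvScanA rest rd (args ++ [t])

-- A's second loop: split args on '|', dropping empty groups, then flush the last group.
def pvSplitPipesA (args : List String) : List (List String) :=
  let p := args.foldl
    (fun (acc : List (List String) × List String) t =>
      if t == "|" then ((if acc.2.isEmpty then acc.1 else acc.1 ++ [acc.2]), [])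
      else (acc.1, acc.2 ++ [t])) ([], [])
  if p.2.isEmpty then p.1 else p.1 ++ [p.2]

def parse_command (line : String) : List (List String) × (List (String × Option String)) × List String :=
  let tokens := PySem.Str.split₀ (PySem.Str.strip line)
  if tokens.isEmpty then ([], [], [])
  else
    let rd0 : PySem.Dict String (Option String) :=
      (PySem.Dict.empty.insert "<" none).insert ">" none
    let p := pvScanA tokens rd0 []
    if !(p.2.contains "|") then ([p.2], p.1.items, [])
    else (pvSplitPipesA p.2, p.1.items, [])

-- ===== PORT B =====
-- single fused scan: redirect pairs go to the dict, '|' closes the current group and sets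
-- the saw flag, other tokens extend the current group; at the end, pipe-free lines yield
-- [cur] even when cur is empty.
def pvScanB : List String → List String → List (List String) → Bool →
    PySem.Dict String (Option String) →
    List (List String) × PySem.Dict String (Option String)
  | [], cur, gs, saw, rd =>
    ((if saw then (if cur.isEmpty then gs else gs ++ [cur]) else [cur]), rd)
  | t :: rest, cur, gs, saw, rd =>
    if t == "<" || t == ">" then
      match rest with
      | [] => ((if saw then (if cur.isEmpty then gs else gs ++ [cur]) else [cur]), rd)
          -- Python B: raise ValueError (outside Pre_)
      | f :: rest' => pvScanB rest' cur gs saw (rd.insert t (some f))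
    else if t == "|" then
      pvScanB rest [] (if cur.isEmpty then gs else gs ++ [cur]) true rd
    else pvScanB rest (cur ++ [t]) gs saw rd

def parse_command_alt (line : String) : List (List String) × (List (String × Option String)) × List String :=
  let tokens := PySem.Str.split₀ (PySem.Str.strip line)
  if tokens.isEmpty then ([], [], [])
  else
    let rd0 : PySem.Dict String (Option String) :=
      (PySem.Dict.empty.insert "<" none).insert ">" none
    let q := pvScanB tokens [] [] false rd0
    (q.1, q.2.items, [])

-- ===== PRECONDITION & SPEC =====
-- Pre_ excludes exactly the lines on which both Pythons raise ValueError ("Missing file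
-- after …"): those whose token list ends in an ODD-length run of '<'/'>' tokens (the scan
-- pairs trailing redirects two by two, so an odd trailing run leaves one with no file).
def Pre_parse_command (line : String) : Prop :=
  Even (((PySem.Str.split₀ (PySem.Str.strip line)).reverse.takeWhile
    (fun t => t == "<" || t == ">")).length)
instance (line : String) : Decidable (Pre_parse_command line) := by
  unfold Pre_parse_command; infer_instance

def pvWitness_parse_command : String := "a | b"

def Spec_parse_command (line : String) (out : List (List String) × (List (String × Option String)) × List String) : Prop := out = parse_command_alt line
instance (line : String) (out : List (List String) × (List (String × Option String)) × List String) : Decidable (Spec_parse_command line out) := by unfold Spec_parse_command; infer_instance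

-- ===== CLAIM (what is proved, stated in full; the proofs are below) =====
def Claim_equal_parse_command : Prop := ∀ (line : String), Dom_parse_command line → Pre_parse_command line → Spec_parse_command line (parse_command line)

-- ===== LEMMAS AND PROOFS =====

-- the non-redirect tokens A's first loop collects (redirects consume their file token)
def pvArgsOf : List String → List String
  | [] => []
  | t :: rest =>
    if t == "<" || t == ">" then
      match rest with
      | [] => []
      | _ :: rest' => pvArgsOf rest'
    else t :: pvArgsOf rest

-- the dict A's first loop builds
def pvRdOf : List String → PySem.Dict String (Option String) → PySem.Dict String (Option String)
  | [], rd => rd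
  | t :: rest, rd =>
    if t == "<" || t == ">" then
      match rest with
      | [] => rd
      | f :: rest' => pvRdOf rest' (rd.insert t (some f))
    else pvRdOf rest rd

-- B's pipe handling, abstracted away from the dict
def pvPipe : List String → List String → List (List String) → Bool → List (List String)
  | [], cur, gs, saw => if saw then (if cur.isEmpty then gs else gs ++ [cur]) else [cur]
  | t :: rest, cur, gs, saw =>
    if t == "|" then pvPipe rest [] (if cur.isEmpty then gs else gs ++ [cur]) true
    else pvPipe rest (cur ++ [t]) gs saw

theorem pvScanA_eq (toks : List String) :
    ∀ rd args, pvScanA toks rd args = (pvRdOf toks rd, args ++ pvArgsOf toks) := by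
  induction toks using pvArgsOf.induct with
  | case1 => intro rd args; simp [pvScanA, pvRdOf, pvArgsOf]
  | case2 t hred => intro rd args; simp [pvScanA, pvRdOf, pvArgsOf, hred]
  | case3 t hred f rest ih => intro rd args; simp [pvScanA, pvRdOf, pvArgsOf, hred, ih]
  | case4 t rest hred ih =>
    intro rd args
    rw [pvScanA.eq_def, pvRdOf.eq_def, pvArgsOf.eq_def]
    simp [hred, ih]

theorem pvScanB_eq (toks : List String) :
    ∀ cur gs saw rd,
      pvScanB toks cur gs saw rd = (pvPipe (pvArgsOf toks) cur gs saw, pvRdOf toks rd) := by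
  induction toks using pvArgsOf.induct with
  | case1 => intro cur gs saw rd; simp [pvScanB, pvRdOf, pvArgsOf, pvPipe]
  | case2 t hred => intro cur gs saw rd; simp [pvScanB, pvRdOf, pvArgsOf, pvPipe, hred]
  | case3 t hred f rest ih => intro cur gs saw rd; simp [pvScanB, pvRdOf, pvArgsOf, hred, ih]
  | case4 t rest hred ih =>
    intro cur gs saw rd
    rw [pvScanB.eq_def, pvRdOf.eq_def, pvArgsOf.eq_def]
    by_cases hp : t == "|" <;> simp [pvPipe, hred, hp, ih]

theorem pvPipe_no_pipe (args : List String) :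
    ∀ cur gs, "|" ∉ args → pvPipe args cur gs false = [cur ++ args] := by
  induction args with
  | nil => intro cur gs _; simp [pvPipe]
  | cons t rest ih =>
    intro cur gs h
    have ht : ¬ t = "|" := fun e => h (by simp [e])
    simp only [pvPipe, beq_iff_eq, ht, if_false]
    rw [show cur ++ t :: rest = (cur ++ [t]) ++ rest by simp]
    exact ih (cur ++ [t]) gs (fun hm => h (List.mem_cons_of_mem _ hm))

theorem pvPipe_mem (args : List String) :
    ∀ cur gs, "|" ∈ args → pvPipe args cur gs false = pvPipe args cur gs true := by
  induction args with
  | nil => intro _ _ h; simp at h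
  | cons t rest ih =>
    intro cur gs h
    by_cases ht : t = "|"
    · simp [pvPipe, ht]
    · have hm : "|" ∈ rest := by
        rcases List.mem_cons.mp h with h1 | h1
        · exact absurd h1.symm ht
        · exact h1
      simp only [pvPipe, beq_iff_eq, ht, if_false]
      exact ih _ _ hm

def pvFinish (p : List (List String) × List String) : List (List String) :=
  if p.2.isEmpty then p.1 else p.1 ++ [p.2]

def pvStep (acc : List (List String) × List String) (t : String) :
    List (List String) × List String :=
  if t == "|" then ((if acc.2.isEmpty then acc.1 else acc.1 ++ [acc.2]), [])
  else (acc.1, acc.2 ++ [t])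

theorem pvSplitPipesA_eq (args : List String) :
    pvSplitPipesA args = pvFinish (args.foldl pvStep ([], [])) := rfl

theorem pvPipe_foldl (args : List String) :
    ∀ cur gs, pvPipe args cur gs true = pvFinish (args.foldl pvStep (gs, cur)) := by
  induction args with
  | nil => intro cur gs; simp [pvPipe, pvFinish]
  | cons t rest ih =>
    intro cur gs
    by_cases ht : t == "|" <;>
      simp only [pvPipe, ht, if_true, if_false, Bool.false_eq_true, List.foldl_cons,
        pvStep, ih]

-- ===== VERDICT (by name: the statement is the Claim_ definition above) =====
theorem parse_command_spec : Claim_equal_parse_command := by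
  intro line _ _
  unfold Spec_parse_command parse_command parse_command_alt
  set toks := PySem.Str.split₀ (PySem.Str.strip line) with htoks
  by_cases he : toks.isEmpty
  · rw [if_pos he, if_pos he]
  · have he' : toks.isEmpty = false := by simpa using he
    simp only [he', Bool.false_eq_true, if_false, pvScanA_eq, pvScanB_eq, List.nil_append]
    by_cases hc : (pvArgsOf toks).contains "|"
    · simp only [hc, Bool.not_true, Bool.false_eq_true, if_false]
      have hm : "|" ∈ pvArgsOf toks := by simpa using hc
      rw [pvPipe_mem _ _ _ hm, pvPipe_foldl, ← pvSplitPipesA_eq]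
    · have hc' : (pvArgsOf toks).contains "|" = false := by simpa using hc
      simp only [hc', Bool.not_false, if_true]
      have hm : "|" ∉ pvArgsOf toks := by simpa using hc
      rw [pvPipe_no_pipe _ _ _ hm]
      simp
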